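-- pv_equiv track=rewrite | github.com/FarisKarim/codeforces_solutions | 800/1472A.py | solve
-- ===== SOURCE A (Python) =====
-- def solve(w, h, n):
--     pieces = 1
--
--     while (w % 2 == 0 or h % 2 == 0) and pieces < n:
--         if w % 2 == 0:
--             w //= 2
--             pieces *= 2
--         if h % 2 == 0:
--             h //= 2
--             pieces *= 2
--     if pieces >= n:
--          return True
--     return False
-- ===== SOURCE B (Python) =====
-- def solve(w, h, n):
--     # One halving cut doubles the piece count, so it suffices to obtain
--     # ceil(n/2) pieces from the halved bar: recurse, shrinking the target n,
--     # until it collapses to 1 (success) or no side is even (failure).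
--     if n <= 1:
--         return True
--     if w % 2 == 0:
--         return solve(w // 2, h, (n + 1) // 2)
--     if h % 2 == 0:
--         return solve(w, h // 2, (n + 1) // 2)
--     return False
-- ===== Notes on version B (the rewrite author's own statement) =====
-- stated objective: simpler
-- what changed: B recursively shrinks the target piece count n to ceil(n/2) each time it halves an even dimension, succeeding once the target collapses to 1, instead of A's loop that keeps a pieces counter, doubles it per halving and compares pieces with n.
import Mathlib
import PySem

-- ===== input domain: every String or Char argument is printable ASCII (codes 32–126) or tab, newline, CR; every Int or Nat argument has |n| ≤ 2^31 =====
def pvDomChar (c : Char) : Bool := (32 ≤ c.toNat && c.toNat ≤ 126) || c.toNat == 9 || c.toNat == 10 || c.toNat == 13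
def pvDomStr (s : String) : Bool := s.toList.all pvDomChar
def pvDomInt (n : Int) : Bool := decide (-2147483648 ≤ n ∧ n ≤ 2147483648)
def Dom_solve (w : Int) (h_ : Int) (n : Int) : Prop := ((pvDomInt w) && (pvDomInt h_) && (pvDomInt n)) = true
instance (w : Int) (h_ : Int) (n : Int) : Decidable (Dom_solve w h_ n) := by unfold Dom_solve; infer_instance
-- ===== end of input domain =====

-- B recursively shrinks the target n to ceil(n/2) per halving of a dimension instead of
-- A's doubling pieces counter compared against n (objective: simpler).

-- ===== PORT A =====
-- A's while loop, state (w, h, pieces).  The Nat argument is pure fuel making the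
-- recursion structural: each iteration at least doubles pieces (so n - pieces drops by
-- at least 1), hence fuel ≥ (n - pieces).toNat is never exhausted; solve passes
-- n.toNat + 1.  On fuel 0 it returns the same exit expression as the loop's exit.
def solveLoop : Nat → Int → Int → Int → Int → Bool
  | 0, _, _, n, pieces => decide (pieces ≥ n)
  | fuel + 1, w, h_, n, pieces =>
    if (PySem.Int.mod w 2 = 0 ∨ PySem.Int.mod h_ 2 = 0) ∧ pieces < n then
      if PySem.Int.mod w 2 = 0 then
        if PySem.Int.mod h_ 2 = 0 then
          solveLoop fuel (PySem.Int.floordiv w 2) (PySem.Int.floordiv h_ 2) n (pieces * 2 * 2)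
        else
          solveLoop fuel (PySem.Int.floordiv w 2) h_ n (pieces * 2)
      else
        solveLoop fuel w (PySem.Int.floordiv h_ 2) n (pieces * 2)
    else
      decide (pieces ≥ n)

def solve (w : Int) (h_ : Int) (n : Int) : Bool := solveLoop (n.toNat + 1) w h_ n 1

-- ===== PORT B =====
-- B's recursion: success when the target n reaches 1; otherwise halve an even
-- dimension and ceil-halve the target.  Terminates because n.toNat strictly drops.
def solve_alt (w : Int) (h_ : Int) (n : Int) : Bool :=
  if hn : n ≤ 1 then true
  else if PySem.Int.mod w 2 = 0 then
    solve_alt (PySem.Int.floordiv w 2) h_ (PySem.Int.floordiv (n + 1) 2)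
  else if PySem.Int.mod h_ 2 = 0 then
    solve_alt w (PySem.Int.floordiv h_ 2) (PySem.Int.floordiv (n + 1) 2)
  else false
termination_by n.toNat
decreasing_by
  all_goals rw [PySem.Int.floordiv_eq_ediv_of_pos (by norm_num)]; omega

-- ===== PRECONDITION & SPEC =====
def Spec_solve (w : Int) (h_ : Int) (n : Int) (out : Bool) : Prop := out = solve_alt w h_ n
instance (w : Int) (h_ : Int) (n : Int) (out : Bool) : Decidable (Spec_solve w h_ n out) := by unfold Spec_solve; infer_instance

-- ===== CLAIM (what is proved, stated in full; the proofs are below) =====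
def Claim_equal_solve : Prop := ∀ (w : Int) (h_ : Int) (n : Int), Dom_solve w h_ n → Spec_solve w h_ n (solve w h_ n)

-- ===== LEMMAS AND PROOFS =====

theorem pymod2 (m : Int) : PySem.Int.mod m 2 = m % 2 :=
  PySem.Int.mod_eq_emod_of_pos (by norm_num)
theorem pydiv2 (m : Int) : PySem.Int.floordiv m 2 = m / 2 :=
  PySem.Int.floordiv_eq_ediv_of_pos (by norm_num)

theorem half_ne {m : Int} (hm : m ≠ 0) (he : PySem.Int.mod m 2 = 0) :
    PySem.Int.floordiv m 2 ≠ 0 := by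
  rw [pydiv2]; rw [pymod2] at he; omega

theorem half_natAbs_lt {m : Int} (hm : m ≠ 0) (he : PySem.Int.mod m 2 = 0) :
    (PySem.Int.floordiv m 2).natAbs < m.natAbs := by
  rw [pydiv2]; rw [pymod2] at he; omega

-- proof-side 2-adic valuation (fuel-driven), used to characterise BOTH ports
def v2loop : Nat → Int → Nat → Nat
  | 0, _, acc => acc
  | fuel + 1, m, acc =>
    if PySem.Int.mod m 2 = 0 then v2loop fuel (PySem.Int.floordiv m 2) (acc + 1) else acc

theorem v2loop_fuel (f1 : Nat) (f2 : Nat) (m : Int) (acc : Nat) (hm : m ≠ 0)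
    (h1 : m.natAbs ≤ f1) (h2 : m.natAbs ≤ f2) : v2loop f1 m acc = v2loop f2 m acc := by
  induction f1 generalizing f2 m acc with
  | zero => omega
  | succ k1 ih =>
    cases f2 with
    | zero => omega
    | succ k2 =>
      by_cases he : PySem.Int.mod m 2 = 0
      · simp only [v2loop, he, if_pos]
        exact ih k2 _ _ (half_ne hm he)
          (by have := half_natAbs_lt hm he; omega)
          (by have := half_natAbs_lt hm he; omega)
      · simp only [v2loop, he, if_neg, not_false_iff]

theorem v2loop_acc (f : Nat) (m : Int) (acc : Nat) :
    v2loop f m (acc + 1) = v2loop f m acc + 1 := by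
  induction f generalizing m acc with
  | zero => rfl
  | succ k ih =>
    by_cases he : PySem.Int.mod m 2 = 0
    · simp only [v2loop, he, if_pos]; exact ih _ _
    · simp only [v2loop, he, if_neg, not_false_iff]

theorem v2_even {m : Int} (hm : m ≠ 0) (he : PySem.Int.mod m 2 = 0) :
    v2loop m.natAbs m 0 =
      v2loop (PySem.Int.floordiv m 2).natAbs (PySem.Int.floordiv m 2) 0 + 1 := by
  obtain ⟨k, hk⟩ : ∃ k, m.natAbs = k + 1 := ⟨m.natAbs - 1, by omega⟩
  rw [hk]
  simp only [v2loop, he, if_pos]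
  rw [v2loop_fuel k (PySem.Int.floordiv m 2).natAbs _ _ (half_ne hm he)
        (by have := half_natAbs_lt hm he; omega) (le_refl _)]
  exact v2loop_acc _ _ 0

theorem v2_odd {m : Int} (hm : m ≠ 0) (he : ¬ PySem.Int.mod m 2 = 0) :
    v2loop m.natAbs m 0 = 0 := by
  obtain ⟨k, hk⟩ : ∃ k, m.natAbs = k + 1 := ⟨m.natAbs - 1, by omega⟩
  rw [hk]
  simp only [v2loop, he, if_neg, not_false_iff]

-- when one side is zero, A's loop keeps doubling pieces until pieces ≥ n: True
theorem solveLoop_zero (fuel : Nat) (w : Int) (h_ : Int) (n : Int) (pieces : Int)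
    (hp : 1 ≤ pieces) (hf : (n - pieces).toNat ≤ fuel) (hz : w = 0 ∨ h_ = 0) :
    solveLoop fuel w h_ n pieces = true := by
  induction fuel generalizing w h_ pieces with
  | zero => simp only [solveLoop, decide_eq_true_eq, ge_iff_le]; omega
  | succ f ih =>
    have hmod : PySem.Int.mod w 2 = 0 ∨ PySem.Int.mod h_ 2 = 0 := by
      rcases hz with hz | hz <;> [left; right] <;> simp [hz]
    by_cases hn : pieces < n
    · simp only [solveLoop, if_pos (And.intro hmod hn)]
      have hz2 : ∀ x : Int, x = 0 → PySem.Int.floordiv x 2 = 0 := by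
        intro x hx; simp [hx]
      split
      · split
        · exact ih _ _ _ (by omega) (by omega)
            (by rcases hz with hz | hz <;> [left; right] <;> exact hz2 _ hz)
        · exact ih _ _ _ (by omega) (by omega)
            (by rcases hz with hz | hz
                · left; exact hz2 _ hz
                · exact absurd ((by simp [hz]) : PySem.Int.mod h_ 2 = 0) (by assumption))
      · exact ih _ _ _ (by omega) (by omega)
          (by rcases hz with hz | hz
              · exact absurd ((by simp [hz]) : PySem.Int.mod w 2 = 0) (by assumption)
              · right; exact hz2 _ hz)
    · have : ¬ ((PySem.Int.mod w 2 = 0 ∨ PySem.Int.mod h_ 2 = 0) ∧ pieces < n) :=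
        fun hcc => hn hcc.2
      simp only [solveLoop, if_neg this, decide_eq_true_eq, ge_iff_le]
      omega

-- A's loop decides pieces·2^(v2 w + v2 h) ≥ n for nonzero w, h
theorem solveLoop_eq (fuel : Nat) (w : Int) (h_ : Int) (n : Int) (pieces : Int)
    (hp : 1 ≤ pieces) (hf : (n - pieces).toNat ≤ fuel) (hw0 : w ≠ 0) (hh0 : h_ ≠ 0) :
    solveLoop fuel w h_ n pieces =
      decide (n ≤ pieces * 2 ^ (v2loop w.natAbs w 0 + v2loop h_.natAbs h_ 0)) := by
  have hone : ∀ k : Nat, (1 : Int) ≤ 2 ^ k := fun k => one_le_pow₀ (by norm_num)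
  induction fuel generalizing w h_ pieces with
  | zero =>
    simp only [solveLoop]
    rw [decide_eq_true (by omega : pieces ≥ n),
        decide_eq_true (le_trans (by omega : n ≤ pieces)
          (le_mul_of_one_le_right (by omega) (hone _)))]
  | succ f ih =>
    by_cases hc : (PySem.Int.mod w 2 = 0 ∨ PySem.Int.mod h_ 2 = 0) ∧ pieces < n
    · simp only [solveLoop, if_pos hc]
      by_cases hw : PySem.Int.mod w 2 = 0
      · by_cases hh : PySem.Int.mod h_ 2 = 0
        · rw [if_pos hw, if_pos hh,
              ih _ _ _ (by omega) (by omega) (half_ne hw0 hw) (half_ne hh0 hh),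
              v2_even hw0 hw, v2_even hh0 hh]
          generalize v2loop (PySem.Int.floordiv w 2).natAbs (PySem.Int.floordiv w 2) 0 = a
          generalize v2loop (PySem.Int.floordiv h_ 2).natAbs (PySem.Int.floordiv h_ 2) 0 = b
          rw [show pieces * 2 ^ (a + 1 + (b + 1)) = pieces * 2 * 2 * 2 ^ (a + b) from by ring]
        · rw [if_pos hw, if_neg hh,
              ih _ _ _ (by omega) (by omega) (half_ne hw0 hw) hh0,
              v2_even hw0 hw]
          generalize v2loop (PySem.Int.floordiv w 2).natAbs (PySem.Int.floordiv w 2) 0 = a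
          generalize v2loop h_.natAbs h_ 0 = b
          rw [show pieces * 2 ^ (a + 1 + b) = pieces * 2 * 2 ^ (a + b) from by ring]
      · have hh : PySem.Int.mod h_ 2 = 0 := hc.1.resolve_left hw
        rw [if_neg hw,
            ih _ _ _ (by omega) (by omega) hw0 (half_ne hh0 hh),
            v2_even hh0 hh]
        generalize v2loop w.natAbs w 0 = a
        generalize v2loop (PySem.Int.floordiv h_ 2).natAbs (PySem.Int.floordiv h_ 2) 0 = b
        rw [show pieces * 2 ^ (a + (b + 1)) = pieces * 2 * 2 ^ (a + b) from by ring]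
    · simp only [solveLoop, if_neg hc]
      by_cases hn : pieces < n
      · have hw : PySem.Int.mod w 2 ≠ 0 := fun h => hc ⟨Or.inl h, hn⟩
        have hh : PySem.Int.mod h_ 2 ≠ 0 := fun h => hc ⟨Or.inr h, hn⟩
        rw [v2_odd hw0 hw, v2_odd hh0 hh]
        norm_num
      · rw [decide_eq_true (by omega : pieces ≥ n),
            decide_eq_true (le_trans (by omega : n ≤ pieces)
              (le_mul_of_one_le_right (by omega) (hone _)))]

-- when one side is zero, B's recursion keeps ceil-halving n until n ≤ 1: True
theorem alt_zero (k : Nat) (w : Int) (h_ : Int) (n : Int)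
    (hk : n.toNat ≤ k) (hz : w = 0 ∨ h_ = 0) : solve_alt w h_ n = true := by
  induction k generalizing w h_ n with
  | zero => rw [solve_alt]; rw [dif_pos (by omega : n ≤ 1)]
  | succ k ih =>
    by_cases hn : n ≤ 1
    · rw [solve_alt, dif_pos hn]
    · rw [solve_alt, dif_neg hn]
      have hstep : (PySem.Int.floordiv (n + 1) 2).toNat ≤ k := by
        rw [pydiv2]; omega
      rcases hz with hz | hz
      · rw [if_pos (by simp [hz] : PySem.Int.mod w 2 = 0)]
        exact ih _ _ _ hstep (Or.inl (by simp [hz]))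
      · by_cases hw : PySem.Int.mod w 2 = 0
        · rw [if_pos hw]
          exact ih _ _ _ hstep (Or.inr hz)
        · rw [if_neg hw, if_pos (by simp [hz] : PySem.Int.mod h_ 2 = 0)]
          exact ih _ _ _ hstep (Or.inr (by simp [hz]))

-- B's recursion decides n ≤ 2^(v2 w + v2 h) for nonzero w, h
theorem alt_char (k : Nat) (w : Int) (h_ : Int) (n : Int)
    (hk : n.toNat ≤ k) (hw0 : w ≠ 0) (hh0 : h_ ≠ 0) :
    solve_alt w h_ n =
      decide (n ≤ 2 ^ (v2loop w.natAbs w 0 + v2loop h_.natAbs h_ 0)) := by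
  have hone : ∀ k : Nat, (1 : Int) ≤ 2 ^ k := fun k => one_le_pow₀ (by norm_num)
  induction k generalizing w h_ n with
  | zero =>
    rw [solve_alt, dif_pos (by omega : n ≤ 1),
        decide_eq_true (le_trans (by omega : n ≤ 1) (hone _))]
  | succ k ih =>
    by_cases hn : n ≤ 1
    · rw [solve_alt, dif_pos hn, decide_eq_true (le_trans hn (hone _))]
    · rw [solve_alt, dif_neg hn]
      have hstep : (PySem.Int.floordiv (n + 1) 2).toNat ≤ k := by
        rw [pydiv2]; omega
      have hceil : ∀ m : Int, (PySem.Int.floordiv (n + 1) 2 ≤ m ↔ n ≤ 2 * m) := by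
        intro m; rw [pydiv2]; omega
      by_cases hw : PySem.Int.mod w 2 = 0
      · rw [if_pos hw, ih _ _ _ hstep (half_ne hw0 hw) hh0, v2_even hw0 hw]
        generalize v2loop (PySem.Int.floordiv w 2).natAbs (PySem.Int.floordiv w 2) 0 = a
        generalize v2loop h_.natAbs h_ 0 = b
        rw [decide_eq_decide.mpr
              ((hceil _).trans (by rw [show (2:Int) * 2 ^ (a + b) = 2 ^ (a + 1 + b) from by ring]))]
      · rw [if_neg hw]
        by_cases hh : PySem.Int.mod h_ 2 = 0
        · rw [if_pos hh, ih _ _ _ hstep hw0 (half_ne hh0 hh), v2_even hh0 hh]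
          generalize v2loop w.natAbs w 0 = a
          generalize v2loop (PySem.Int.floordiv h_ 2).natAbs (PySem.Int.floordiv h_ 2) 0 = b
          rw [decide_eq_decide.mpr
                ((hceil _).trans (by rw [show (2:Int) * 2 ^ (a + b) = 2 ^ (a + (b + 1)) from by ring]))]
        · rw [if_neg hh, v2_odd hw0 hw, v2_odd hh0 hh]
          rw [decide_eq_false (by omega : ¬ n ≤ 2 ^ (0 + 0))]

-- ===== VERDICT (by name: the statement is the Claim_ definition above) =====
theorem solve_spec : Claim_equal_solve := by
  intro w h_ n _
  unfold Spec_solve solve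
  by_cases hz : w = 0 ∨ h_ = 0
  · rw [solveLoop_zero _ w h_ n 1 (by omega) (by omega) hz,
        alt_zero n.toNat w h_ n (le_refl _) hz]
  · rw [solveLoop_eq _ w h_ n 1 (by omega) (by omega) (fun h => hz (Or.inl h))
          (fun h => hz (Or.inr h)),
        alt_char n.toNat w h_ n (le_refl _) (fun h => hz (Or.inl h))
          (fun h => hz (Or.inr h))]
    simp only [one_mul]
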